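-- pv_equiv track=rewrite | github.com/aidenwalker1/ema_analysis | stat_features.py | mean_crossings
-- ===== SOURCE A (Python) =====
-- def mean_crossings(data, mean):
--     """ Compute zero crossings of the input array of data. Mean crossings is
--     computed as the number of times the data value crosses the mean as the
--     sequence is traversed from beginning to end.
--     """
--     rel = 0
--     count = 0
--
--     for x in data:
--         if x < mean:
--             if rel > 0:
--                 count += 1
--             rel = -1
--         elif x > mean:
--             if rel < 0:
--                 count += 1
--             rel = 1
--         else:
--             rel = 0
--     return count
-- ===== SOURCE B (Python) =====
-- def mean_crossings(data, mean):
--     """Two-phase: materialise the sign sequence, then count adjacent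
--     strictly-opposite-sign pairs."""
--     signs = [-1 if x < mean else (1 if x > mean else 0) for x in data]
--     count = 0
--     for p, q in zip(signs, signs[1:]):
--         if p * q < 0:
--             count += 1
--     return count
-- ===== Notes on version B (the rewrite author's own statement) =====
-- stated objective: alternative
-- what changed: Replaces the online single-variable state machine by a two-phase computation: first materialise the three-way sign sequence, then count adjacent pairs with strictly negative product.
import Mathlib
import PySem

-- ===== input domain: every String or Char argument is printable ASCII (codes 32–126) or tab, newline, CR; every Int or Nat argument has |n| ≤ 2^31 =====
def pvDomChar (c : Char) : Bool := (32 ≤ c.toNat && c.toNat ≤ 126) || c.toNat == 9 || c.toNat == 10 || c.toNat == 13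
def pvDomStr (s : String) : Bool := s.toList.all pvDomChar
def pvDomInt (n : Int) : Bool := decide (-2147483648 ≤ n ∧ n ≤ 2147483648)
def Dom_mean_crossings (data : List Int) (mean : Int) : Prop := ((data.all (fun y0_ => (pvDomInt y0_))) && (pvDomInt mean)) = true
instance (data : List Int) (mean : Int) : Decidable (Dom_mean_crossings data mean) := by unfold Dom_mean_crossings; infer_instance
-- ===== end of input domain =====

-- B replaces A's online rel/count state machine by a two-phase computation
-- (materialise the sign sequence, then count adjacent opposite-sign pairs);
-- objective: alternative decomposition, same O(n) cost.

-- ===== PORT A =====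
-- for-loop over data carrying (rel, count)
def mean_crossings (data : List Int) (mean : Int) : Int :=
  (data.foldl
    (fun (st : Int × Int) x =>
      let rel := st.1
      let count := st.2
      if x < mean then
        (-1, if rel > 0 then count + 1 else count)
      else if x > mean then
        (1, if rel < 0 then count + 1 else count)
      else
        (0, count))
    (0, 0)).2

-- ===== PORT B =====
def mean_crossings_alt (data : List Int) (mean : Int) : Int :=
  let signs := data.map (fun x => if x < mean then (-1 : Int) else if x > mean then 1 else 0)
  (signs.zip (PySem.List.slice signs (some 1) none)).foldl
    (fun count pq => if pq.1 * pq.2 < 0 then count + 1 else count) 0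

-- ===== PRECONDITION & SPEC =====
def Spec_mean_crossings (data : List Int) (mean : Int) (out : Int) : Prop := out = mean_crossings_alt data mean
instance (data : List Int) (mean : Int) (out : Int) : Decidable (Spec_mean_crossings data mean out) := by unfold Spec_mean_crossings; infer_instance

-- ===== CLAIM (what is proved, stated in full; the proofs are below) =====
def Claim_equal_mean_crossings : Prop := ∀ (data : List Int) (mean : Int), Dom_mean_crossings data mean → Spec_mean_crossings data mean (mean_crossings data mean)

-- ===== LEMMAS AND PROOFS =====

-- A's step over one element, seen through the sign of x: the count increments
-- exactly when rel * sign x < 0, and the new rel is sign x.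
theorem pv_stepA (mean rel count x : Int) :
    (if x < mean then
        ((-1 : Int), if rel > 0 then count + 1 else count)
      else if x > mean then
        ((1 : Int), if rel < 0 then count + 1 else count)
      else
        ((0 : Int), count))
    = ((if x < mean then (-1 : Int) else if x > mean then 1 else 0),
       count + (if rel * (if x < mean then (-1 : Int) else if x > mean then 1 else 0) < 0 then 1 else 0)) := by
  split_ifs with h1 h2 h3 h4 h5 h6 h7 <;> simp_all <;> omega

-- pair count along a sign list, seeded with the previous sign
def pvPairCount (prev : Int) : List Int → Int
  | [] => 0
  | s :: t => (if prev * s < 0 then 1 else 0) + pvPairCount s t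

theorem pv_foldA_eq (mean : Int) : ∀ (l : List Int) (rel count : Int),
    (l.foldl
      (fun (st : Int × Int) x =>
        let rel := st.1
        let count := st.2
        if x < mean then
          (-1, if rel > 0 then count + 1 else count)
        else if x > mean then
          (1, if rel < 0 then count + 1 else count)
        else
          (0, count))
      (rel, count)).2
    = count + pvPairCount rel (l.map (fun x => if x < mean then (-1 : Int) else if x > mean then 1 else 0)) := by
  intro l
  induction l with
  | nil => intro rel count; simp [pvPairCount]
  | cons x t ih =>
      intro rel count
      simp only [List.foldl_cons, List.map_cons, pvPairCount]
      rw [pv_stepA]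
      rw [ih]
      ring

theorem pv_foldB_eq : ∀ (signs : List Int) (count : Int),
    ((signs.zip signs.tail).foldl
      (fun count pq => if pq.1 * pq.2 < 0 then count + 1 else count) count)
    = count + (match signs with | [] => 0 | s :: t => pvPairCount s t) := by
  intro signs
  induction signs with
  | nil => intro count; simp
  | cons s t ih =>
      intro count
      cases t with
      | nil => simp [pvPairCount]
      | cons q r =>
          simp only [List.tail_cons, List.zip_cons_cons, List.foldl_cons]
          rw [show ((q :: r).zip r) = ((q :: r).zip (q :: r).tail) from rfl, ih]
          simp only [pvPairCount]
          split_ifs <;> ring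

theorem pvPairCount_zero (l : List Int) :
    pvPairCount 0 l = (match l with | [] => 0 | s :: t => pvPairCount s t) := by
  cases l with
  | nil => rfl
  | cons s t => simp [pvPairCount]

-- ===== VERDICT (by name: the statement is the Claim_ definition above) =====
theorem mean_crossings_spec : Claim_equal_mean_crossings := by
  intro data mean _
  simp only [Spec_mean_crossings, mean_crossings, mean_crossings_alt,
    PySem.List.slice_from_one]
  rw [pv_foldA_eq, pv_foldB_eq, pvPairCount_zero]
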